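-- pv_equiv track=rewrite | github.com/zeynytu/TOSTrack | lib/test/tracker/ostrack.py | find_middles_of_sequences_above_threshold
-- ===== SOURCE A (Python) =====
-- def find_middles_of_sequences_above_threshold(lst, threshold_length, threshold_confidence):
--     sequences = []
--     current_start = 0
--     current_length = 0
--
--     for i, value in enumerate(lst):
--         if value >= threshold_confidence:
--             if current_length == 0:
--                 current_start = i
--             current_length += 1
--         else:
--             if current_length > threshold_length:
--                 sequences.append((current_start, i - 1))
--             current_length = 0
--
--     # Check at the end of the list
--     if current_length > threshold_length:
--         sequences.append((current_start, len(lst) - 1))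
--
--     middle_indices = [(start + end) // 2 for start, end in sequences]
--     length_of_sequence = [(end - start) for start, end in sequences]
--     return middle_indices, length_of_sequence
-- ===== SOURCE B (Python) =====
-- def find_middles_of_sequences_above_threshold(lst, threshold_length, threshold_confidence):
--     # Edge-detection pipeline: a boolean mask, rise/fall flags from shifted
--     # comparisons, then zip the rising edges with the falling edges.
--     mask = [v >= threshold_confidence for v in lst]
--     rises = [m and not p for p, m in zip([False] + mask, mask)]
--     falls = [m and not q for m, q in zip(mask, mask[1:] + [False])]
--     starts = [i for i, f in enumerate(rises) if f]
--     ends = [i for i, f in enumerate(falls) if f]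
--     pairs = [(s, e) for s, e in zip(starts, ends) if e - s + 1 > threshold_length]
--     return [(s + e) // 2 for s, e in pairs], [e - s for s, e in pairs]
-- ===== Notes on version B (the rewrite author's own statement) =====
-- stated objective: alternative
-- what changed: Replaced A's running-length state machine by stateless edge detection: a boolean mask, rise/fall flags obtained by zipping the mask with its shifted copies, rising edges zipped with falling edges to form the runs, then a filter by run length.
-- outside the precondition, e.g. on find_middles_of_sequences_above_threshold([0], -1, 1): A returns ([-1, 0], [-1, 0]), B returns ([], [])
import Mathlib
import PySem

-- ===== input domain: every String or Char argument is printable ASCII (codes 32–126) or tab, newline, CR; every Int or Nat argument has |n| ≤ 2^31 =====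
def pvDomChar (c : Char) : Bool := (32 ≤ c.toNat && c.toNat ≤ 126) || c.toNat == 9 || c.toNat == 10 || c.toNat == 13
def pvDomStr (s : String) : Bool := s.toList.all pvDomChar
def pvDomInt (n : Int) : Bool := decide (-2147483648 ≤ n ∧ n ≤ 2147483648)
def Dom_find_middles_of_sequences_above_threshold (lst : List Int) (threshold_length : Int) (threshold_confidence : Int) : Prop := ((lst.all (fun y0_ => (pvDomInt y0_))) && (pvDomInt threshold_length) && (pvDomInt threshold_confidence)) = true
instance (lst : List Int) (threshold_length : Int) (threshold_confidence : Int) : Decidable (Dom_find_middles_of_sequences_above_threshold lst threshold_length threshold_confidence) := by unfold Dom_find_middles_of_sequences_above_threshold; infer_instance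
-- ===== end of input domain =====

-- B replaces A's running-length state machine by stateless edge detection (rise/fall flags
-- from shifted-mask comparisons, zipped into runs); equality of the RETURN value is proved
-- for 0 ≤ threshold_length.

-- ===== PORT A =====
-- state = (current_start, current_length, sequences); loop over enumerate(lst)
def find_middles_of_sequences_above_threshold (lst : List Int) (threshold_length : Int) (threshold_confidence : Int) : List Int × List Int :=
  let st := (PySem.List.enumerate lst).foldl
    (fun (st : Int × Int × List (Int × Int)) (iv : Int × Int) =>
      if iv.2 ≥ threshold_confidence then
        ((if st.2.1 = 0 then iv.1 else st.1), st.2.1 + 1, st.2.2)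
      else
        (st.1, 0, if st.2.1 > threshold_length then st.2.2 ++ [(st.1, iv.1 - 1)] else st.2.2))
    (0, 0, [])
  let sequences :=
    if st.2.1 > threshold_length then st.2.2 ++ [(st.1, (lst.length : Int) - 1)] else st.2.2
  (sequences.map (fun p => PySem.Int.floordiv (p.1 + p.2) 2),
   sequences.map (fun p => p.2 - p.1))

-- ===== PORT B =====
-- mask; rises/falls by zipping mask with its shifted copies ([False]+mask, mask[1:]+[False]);
-- starts/ends = indices of true flags (enumerate + filter); zip, filter by run length.
def find_middles_of_sequences_above_threshold_alt (lst : List Int) (threshold_length : Int) (threshold_confidence : Int) : List Int × List Int :=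
  let mask := lst.map (fun v => decide (v ≥ threshold_confidence))
  let rises := ((false :: mask).zip mask).map (fun pm => pm.2 && !pm.1)
  let falls := (mask.zip (mask.drop 1 ++ [false])).map (fun mq => mq.1 && !mq.2)
  let starts := ((PySem.List.enumerate rises).filter (fun x => x.2)).map (fun x => x.1)
  let ends := ((PySem.List.enumerate falls).filter (fun x => x.2)).map (fun x => x.1)
  let pairs := (starts.zip ends).filter (fun p => decide (p.2 - p.1 + 1 > threshold_length))
  (pairs.map (fun p => PySem.Int.floordiv (p.1 + p.2) 2),
   pairs.map (fun p => p.2 - p.1))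

-- ===== PRECONDITION & SPEC =====
-- Pre_ excludes negative threshold_length (a run-length bound, so a count: negative values are
-- outside the function's natural domain); A still returns there, emitting degenerate
-- (start, start-1) pairs for zero-length runs, which B's edge pipeline does not produce.
def Pre_find_middles_of_sequences_above_threshold (lst : List Int) (threshold_length : Int) (threshold_confidence : Int) : Prop :=
  0 ≤ threshold_length

instance (lst : List Int) (threshold_length : Int) (threshold_confidence : Int) : Decidable (Pre_find_middles_of_sequences_above_threshold lst threshold_length threshold_confidence) := by unfold Pre_find_middles_of_sequences_above_threshold; infer_instance

def pvWitness_find_middles_of_sequences_above_threshold : List Int × Int × Int := ([5, 0, 5, 6, 7], 1, 1)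

def Spec_find_middles_of_sequences_above_threshold (lst : List Int) (threshold_length : Int) (threshold_confidence : Int) (out : List Int × List Int) : Prop := out = find_middles_of_sequences_above_threshold_alt lst threshold_length threshold_confidence
instance (lst : List Int) (threshold_length : Int) (threshold_confidence : Int) (out : List Int × List Int) : Decidable (Spec_find_middles_of_sequences_above_threshold lst threshold_length threshold_confidence out) := by unfold Spec_find_middles_of_sequences_above_threshold; infer_instance

-- ===== CLAIM (what is proved, stated in full; the proofs are below) =====
def Claim_equal_find_middles_of_sequences_above_threshold : Prop := ∀ (lst : List Int) (threshold_length : Int) (threshold_confidence : Int), Dom_find_middles_of_sequences_above_threshold lst threshold_length threshold_confidence → Pre_find_middles_of_sequences_above_threshold lst threshold_length threshold_confidence → Spec_find_middles_of_sequences_above_threshold lst threshold_length threshold_confidence (find_middles_of_sequences_above_threshold lst threshold_length threshold_confidence)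

-- ===== LEMMAS AND PROOFS =====

-- recursive characterisation of A's loop (state machine over values, index k)
def pvProcA (tl tc : Int) : Int → List Int → Int → Int → List (Int × Int)
  | k, [], cs, cl => if cl > tl then [(cs, k - 1)] else []
  | k, v :: vs, cs, cl =>
    if v ≥ tc then pvProcA tl tc (k + 1) vs (if cl = 0 then k else cs) (cl + 1)
    else (if cl > tl then [(cs, k - 1)] else []) ++ pvProcA tl tc (k + 1) vs cs 0

-- runs with the length filter applied inline (common middle form)

-- maximal-run list with the length filter applied inline (middle form between the two ports)
def pvProcB (tl tc : Int) : Int → List Int → List (Int × Int)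
  | k, [] => []
  | k, v :: vs =>
    if v ≥ tc then
      (if 1 + ((vs.takeWhile (fun w => decide (w ≥ tc))).length : Int) > tl
       then [(k, k + (vs.takeWhile (fun w => decide (w ≥ tc))).length)] else [])
      ++ pvProcB tl tc (k + 1 + (vs.takeWhile (fun w => decide (w ≥ tc))).length)
           (vs.dropWhile (fun w => decide (w ≥ tc)))
    else pvProcB tl tc (k + 1) vs
termination_by _ l => l.length
decreasing_by
  · simpa using Nat.lt_succ_of_le (List.length_dropWhile_le _ _)
  · simp

-- the unfiltered run decomposition (start, end) of maximal p-runs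
def pvRuns (p : Int → Bool) : Int → List Int → List (Int × Int)
  | _, [] => []
  | k, v :: vs =>
    if p v then
      (k, k + ((vs.takeWhile p).length : Int)) ::
        pvRuns p (k + 1 + ((vs.takeWhile p).length : Int)) (vs.dropWhile p)
    else pvRuns p (k + 1) vs
termination_by _ l => l.length
decreasing_by
  · simpa using Nat.lt_succ_of_le (List.length_dropWhile_le _ _)
  · simp

-- recursive forms of B's rising/falling-edge index lists
def pvSRec : Bool → Int → List Bool → List Int
  | _, _, [] => []
  | prev, k, b :: bs => (if b && !prev then [k] else []) ++ pvSRec b (k + 1) bs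

def pvERec : Int → List Bool → List Int
  | _, [] => []
  | k, b :: bs => (if b && !(bs.headD false) then [k] else []) ++ pvERec (k + 1) bs

theorem pv_bridgeA (tl tc : Int) : ∀ (vs : List Int) (k cs cl : Int) (seqs : List (Int × Int)),
    (let st := (PySem.List.enumerate vs k).foldl
      (fun (st : Int × Int × List (Int × Int)) (iv : Int × Int) =>
        if iv.2 ≥ tc then
          ((if st.2.1 = 0 then iv.1 else st.1), st.2.1 + 1, st.2.2)
        else
          (st.1, 0, if st.2.1 > tl then st.2.2 ++ [(st.1, iv.1 - 1)] else st.2.2))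
      (cs, cl, seqs);
     if st.2.1 > tl then st.2.2 ++ [(st.1, k + (vs.length : Int) - 1)] else st.2.2)
    = seqs ++ pvProcA tl tc k vs cs cl := by
  intro vs
  induction vs with
  | nil => intro k cs cl seqs; simp [PySem.List.enumerate, pvProcA]; split <;> simp
  | cons v vs ih =>
    intro k cs cl seqs
    by_cases hv : v ≥ tc
    · have := ih (k + 1) (if cl = 0 then k else cs) (cl + 1) seqs
      simp only [PySem.List.enumerate_cons, List.foldl_cons, pvProcA, hv, if_pos] at *
      simp only [List.length_cons] at *
      have harith : k + 1 + (vs.length : Int) - 1 = k + ((vs.length : Nat) + 1 : Nat) - 1 := by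
        push_cast; ring
      rw [← harith]
      exact this
    · have := ih (k + 1) cs 0 (if cl > tl then seqs ++ [(cs, k - 1)] else seqs)
      simp only [PySem.List.enumerate_cons, List.foldl_cons, pvProcA, hv, if_neg,
        not_false_iff, List.length_cons] at *
      have harith : k + 1 + (vs.length : Int) - 1 = k + ((vs.length : Nat) + 1 : Nat) - 1 := by
        push_cast; ring
      rw [← harith]
      rw [this]
      split <;> simp

theorem pv_core (tl tc : Int) (htl : 0 ≤ tl) : ∀ (vs : List Int) (k cs cl : Int), 0 ≤ cl →
    pvProcA tl tc k vs cs cl =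
      (if cl = 0 then pvProcB tl tc k vs
       else
        (if cl + ((vs.takeWhile (fun w => decide (w ≥ tc))).length : Int) > tl
         then [(cs, k + ((vs.takeWhile (fun w => decide (w ≥ tc))).length : Int) - 1)] else [])
        ++ pvProcB tl tc (k + ((vs.takeWhile (fun w => decide (w ≥ tc))).length : Int))
             (vs.dropWhile (fun w => decide (w ≥ tc)))) := by
  intro vs
  induction vs with
  | nil =>
    intro k cs cl hcl
    by_cases h0 : cl = 0
    · subst h0
      simp [pvProcA, pvProcB]
      omega
    · simp [pvProcA, pvProcB, h0]
  | cons v vs ih =>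
    intro k cs cl hcl
    by_cases hv : v ≥ tc
    · rw [pvProcA, if_pos hv, ih (k + 1) (if cl = 0 then k else cs) (cl + 1) (by omega)]
      rw [if_neg (show ¬(cl + 1 = 0) by omega)]
      have htw : (v :: vs).takeWhile (fun w => decide (w ≥ tc)) = v :: vs.takeWhile (fun w => decide (w ≥ tc)) := by
        simp [hv]
      have hdw : (v :: vs).dropWhile (fun w => decide (w ≥ tc)) = vs.dropWhile (fun w => decide (w ≥ tc)) := by
        simp [hv]
      rw [htw, hdw]
      simp only [List.length_cons]
      by_cases h0 : cl = 0
      · subst h0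
        simp only [if_pos]
        rw [pvProcB, if_pos hv]
        push_cast
        ring_nf
      · rw [if_neg h0, if_neg h0]
        push_cast
        ring_nf
    · rw [pvProcA, if_neg hv, ih (k + 1) cs 0 le_rfl]
      rw [if_pos rfl]
      by_cases h0 : cl = 0
      · subst h0
        rw [if_pos rfl, if_neg (by omega)]
        rw [pvProcB, if_neg hv]
        simp
      · rw [if_neg h0]
        have htw : (v :: vs).takeWhile (fun w => decide (w ≥ tc)) = [] := by
          simp [hv]
        have hdw : (v :: vs).dropWhile (fun w => decide (w ≥ tc)) = v :: vs := by
          simp [hv]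
        rw [htw, hdw]
        have hB : pvProcB tl tc k (v :: vs) = pvProcB tl tc (k + 1) vs := by
          rw [pvProcB, if_neg hv]
        simp only [List.length_nil, Nat.cast_zero, add_zero]
        rw [hB]

-- B's starts comprehension equals pvSRec

theorem pv_starts_bridge : ∀ (m : List Bool) (prev : Bool) (k : Int),
    ((PySem.List.enumerate (((prev :: m).zip m).map (fun pm => pm.2 && !pm.1)) k).filter
        (fun x => x.2)).map (fun x => x.1) = pvSRec prev k m := by
  intro m
  induction m with
  | nil => intro prev k; simp [PySem.List.enumerate, pvSRec]
  | cons b bs ih =>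
    intro prev k
    simp only [List.zip_cons_cons, List.map_cons, PySem.List.enumerate_cons, pvSRec]
    by_cases hf : (b && !prev) = true
    · simp [List.filter_cons, hf, ih b (k + 1)]
    · simp [List.filter_cons, hf, ih b (k + 1)]

-- B's ends comprehension equals pvERec

theorem pv_ends_bridge : ∀ (m : List Bool) (k : Int),
    ((PySem.List.enumerate ((m.zip (m.drop 1 ++ [false])).map (fun mq => mq.1 && !mq.2)) k).filter
        (fun x => x.2)).map (fun x => x.1) = pvERec k m := by
  intro m
  induction m with
  | nil => intro k; simp [PySem.List.enumerate, pvERec]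
  | cons b bs ih =>
    intro k
    cases bs with
    | nil =>
      simp [PySem.List.enumerate, pvERec, List.filter_cons]
      split <;> simp [PySem.List.enumerate]
    | cons c cs =>
      have ih' := ih k.succ
      simp only [List.drop_succ_cons, List.drop_zero, List.cons_append, List.zip_cons_cons,
        List.map_cons, PySem.List.enumerate_cons, pvERec, List.headD_cons] at *
      by_cases hf : (b && !c) = true
      · simp [List.filter_cons, hf, ih (k + 1)]
      · simp [List.filter_cons, hf, ih (k + 1)]

theorem pv_sRec_shift (p : Int → Bool) : ∀ (vs : List Int) (k : Int),
    pvSRec true k (vs.map p) =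
      pvSRec false (k + ((vs.takeWhile p).length : Int)) ((vs.dropWhile p).map p) := by
  intro vs
  induction vs with
  | nil => intro k; simp [pvSRec]
  | cons v vs ih =>
    intro k
    by_cases hv : p v = true
    · rw [List.takeWhile_cons_of_pos hv, List.dropWhile_cons_of_pos hv]
      simp only [List.map_cons, List.length_cons, hv, pvSRec, Bool.not_true, Bool.and_false]
      simp only [Bool.false_eq_true, if_false, List.nil_append]
      rw [ih (k + 1)]
      have harith : k + 1 + ((vs.takeWhile p).length : Int)
          = k + (((vs.takeWhile p).length + 1 : Nat) : Int) := by push_cast; ring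
      rw [harith]
    · have hf : p v = false := by simpa using hv
      rw [List.takeWhile_cons_of_neg (by simp [hf]), List.dropWhile_cons_of_neg (by simp [hf])]
      simp [pvSRec, hf]

theorem pv_sRec_runs (p : Int → Bool) : ∀ (n : Nat) (vs : List Int), vs.length ≤ n → ∀ k : Int,
    pvSRec false k (vs.map p) = (pvRuns p k vs).map Prod.fst := by
  intro n
  induction n with
  | zero =>
    intro vs h k
    have : vs = [] := by cases vs <;> simp_all
    subst this; simp [pvSRec, pvRuns]
  | succ n ih =>
    intro vs h k
    cases vs with
    | nil => simp [pvSRec, pvRuns]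
    | cons v vs =>
      by_cases hv : p v = true
      · have hdrop : (vs.dropWhile p).length ≤ n := by
          have := List.length_dropWhile_le p vs
          simp at h; omega
        simp only [List.map_cons, pvSRec, hv, Bool.not_false, Bool.and_true, if_pos rfl,
          List.singleton_append, pvRuns, List.map_cons]
        rw [pv_sRec_shift p vs (k + 1), ih _ hdrop]
        constructor
      · have hf : p v = false := by simpa using hv
        simp only [List.map_cons, pvSRec, hf, Bool.false_and, Bool.false_eq_true, if_false,
          List.nil_append, pvRuns]
        exact ih vs (by simp at h; omega) (k + 1)

theorem pv_runs_snd_cons (p : Int → Bool) (v v' : Int) (vs : List Int) (k : Int)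
    (hv : p v = true) (hv' : p v' = true) :
    (pvRuns p k (v :: v' :: vs)).map Prod.snd = (pvRuns p (k + 1) (v' :: vs)).map Prod.snd := by
  simp only [pvRuns, hv, hv', if_pos rfl,
    List.takeWhile_cons_of_pos hv', List.dropWhile_cons_of_pos hv',
    List.length_cons, List.map_cons]
  have h1 : k + (((vs.takeWhile p).length + 1 : Nat) : Int)
      = k + 1 + ((vs.takeWhile p).length : Int) := by push_cast; ring
  have h2 : k + 1 + (((vs.takeWhile p).length + 1 : Nat) : Int)
      = k + 1 + 1 + ((vs.takeWhile p).length : Int) := by push_cast; ring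
  rw [h1, h2]
  simp

theorem pv_eRec_runs (p : Int → Bool) : ∀ (n : Nat) (vs : List Int), vs.length ≤ n → ∀ k : Int,
    pvERec k (vs.map p) = (pvRuns p k vs).map Prod.snd := by
  intro n
  induction n with
  | zero =>
    intro vs h k
    have : vs = [] := by cases vs <;> simp_all
    subst this; simp [pvERec, pvRuns]
  | succ n ih =>
    intro vs h k
    cases vs with
    | nil => simp [pvERec, pvRuns]
    | cons v vs =>
      by_cases hv : p v = true
      · cases vs with
        | nil => simp [pvERec, pvRuns, hv]
        | cons v' t =>
          by_cases hv' : p v' = true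
          · have e : pvERec k (List.map p (v :: v' :: t)) = pvERec (k + 1) (List.map p (v' :: t)) := by
              simp [pvERec, hv, hv']
            rw [e, ih (v' :: t) (by simp at h ⊢; omega) (k + 1),
              ← pv_runs_snd_cons p v v' t k hv hv']
          · have hf : p v' = false := by simpa using hv'
            have e : pvERec k (List.map p (v :: v' :: t)) = k :: pvERec (k + 1) (List.map p (v' :: t)) := by
              simp [pvERec, hv, hf]
            have e2 : pvRuns p k (v :: v' :: t) = (k, k) :: pvRuns p (k + 1) (v' :: t) := by
              simp [pvRuns, hv, List.takeWhile_cons_of_neg (by simp [hf] : ¬ p v' = true),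
                List.dropWhile_cons_of_neg (by simp [hf] : ¬ p v' = true)]
            rw [e, ih (v' :: t) (by simp at h ⊢; omega) (k + 1), e2, List.map_cons]
      · have hf : p v = false := by simpa using hv
        simp only [List.map_cons, pvERec, hf, Bool.false_and, Bool.false_eq_true, if_false,
          List.nil_append, pvRuns]
        exact ih vs (by simp at h; omega) (k + 1)

theorem pv_zip_fst_snd {α β : Type} : ∀ (l : List (α × β)),
    List.zip (l.map Prod.fst) (l.map Prod.snd) = l := by
  intro l
  induction l with
  | nil => rfl
  | cons x xs ih => simp [List.zip_cons_cons, ih]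

theorem pv_runs_filter (tl tc : Int) : ∀ (n : Nat) (vs : List Int), vs.length ≤ n → ∀ k : Int,
    (pvRuns (fun w => decide (w ≥ tc)) k vs).filter (fun q => decide (q.2 - q.1 + 1 > tl))
      = pvProcB tl tc k vs := by
  intro n
  induction n with
  | zero =>
    intro vs h k
    have : vs = [] := by cases vs <;> simp_all
    subst this; simp [pvRuns, pvProcB]
  | succ n ih =>
    intro vs h k
    cases vs with
    | nil => simp [pvRuns, pvProcB]
    | cons v vs =>
      by_cases hv : v ≥ tc
      · have hdrop : (vs.dropWhile (fun w => decide (w ≥ tc))).length ≤ n := by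
          have := List.length_dropWhile_le (fun w => decide (w ≥ tc)) vs
          simp at h; omega
        have e : pvRuns (fun w => decide (w ≥ tc)) k (v :: vs)
            = (k, k + ((vs.takeWhile (fun w => decide (w ≥ tc))).length : Int)) ::
                pvRuns (fun w => decide (w ≥ tc))
                  (k + 1 + ((vs.takeWhile (fun w => decide (w ≥ tc))).length : Int))
                  (vs.dropWhile (fun w => decide (w ≥ tc))) := by
          simp [pvRuns, hv]
        have e2 : pvProcB tl tc k (v :: vs)
            = (if 1 + ((vs.takeWhile (fun w => decide (w ≥ tc))).length : Int) > tl
               then [(k, k + ((vs.takeWhile (fun w => decide (w ≥ tc))).length : Int))] else [])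
              ++ pvProcB tl tc (k + 1 + ((vs.takeWhile (fun w => decide (w ≥ tc))).length : Int))
                   (vs.dropWhile (fun w => decide (w ≥ tc))) := by
          simp [pvProcB, hv]
        rw [e, List.filter_cons, ih _ hdrop, e2]
        set L := ((vs.takeWhile (fun w => decide (w ≥ tc))).length : Int) with hL
        split_ifs with h1 h2 h2
        · simp
        · exfalso; simp only [decide_eq_true_eq] at h1; omega
        · exfalso; simp only [decide_eq_true_eq] at h1; omega
        · rfl
      · have e : pvRuns (fun w => decide (w ≥ tc)) k (v :: vs)
            = pvRuns (fun w => decide (w ≥ tc)) (k + 1) vs := by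
          simp [pvRuns, hv]
        have e2 : pvProcB tl tc k (v :: vs) = pvProcB tl tc (k + 1) vs := by
          simp [pvProcB, hv]
        rw [e, e2]
        exact ih vs (by simp at h; omega) (k + 1)


-- ===== VERDICT (by name: the statement is the Claim_ definition above) =====
theorem find_middles_of_sequences_above_threshold_spec : Claim_equal_find_middles_of_sequences_above_threshold := by
  intro lst tl tc _ hpre
  unfold Spec_find_middles_of_sequences_above_threshold
  simp only [find_middles_of_sequences_above_threshold, find_middles_of_sequences_above_threshold_alt]
  have hA := pv_bridgeA tl tc lst 0 0 0 []
  simp only [zero_add, List.nil_append] at hA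
  have hcore := pv_core tl tc hpre lst 0 0 0 le_rfl
  rw [if_pos rfl] at hcore
  have hS := pv_starts_bridge (lst.map (fun v => decide (v ≥ tc))) false 0
  have hE := pv_ends_bridge (lst.map (fun v => decide (v ≥ tc))) 0
  have hSR := pv_sRec_runs (fun v => decide (v ≥ tc)) lst.length lst le_rfl 0
  have hER := pv_eRec_runs (fun v => decide (v ≥ tc)) lst.length lst le_rfl 0
  have hF := pv_runs_filter tl tc lst.length lst le_rfl 0
  rw [hA, hcore, hS, hE, hSR, hER, pv_zip_fst_snd, hF]
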